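-- pv_equiv track=rewrite | github.com/Redpike/advent-of-code | 2018/d08/d08.py | parse_input_data
-- ===== SOURCE A (Python) =====
-- def parse_input_data(_input: list):
--     _input = [int(x) for x in _input]
--     children, metas = _input[:2]
--     data = _input[2:]
--     scores = []
--     totals = 0
--
--     for i in range(children):
--         total, score, data = parse_input_data(data)
--         totals += total
--         scores.append(score)
--
--     totals += sum(data[:metas])
--
--     if children == 0:
--         return totals, sum(data[:metas]), data[metas:]
--     else:
--         return (
--             totals,
--             sum(scores[k - 1] for k in data[:metas] if 0 < k <= len(scores)),
--             data[metas:]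
--         )
-- ===== SOURCE B (Python) =====
-- def parse_input_data(_input: list):
--     arr = [int(x) for x in _input]
--
--     def node(i):
--         c, m = arr[i], arr[i + 1]
--         i += 2
--         total = 0
--         scores = []
--         for _ in range(c):
--             t, s, i = node(i)
--             total += t
--             scores.append(s)
--         meta = arr[i:i + m]
--         total += sum(meta)
--         value = sum(meta) if c == 0 else sum(
--             scores[k - 1] for k in meta if 0 < k <= c)
--         return total, value, i + m
--
--     total, value, end = node(0)
--     return total, value, arr[end:]
-- ===== Notes on version B (the rewrite author's own statement) =====
-- stated objective: alternative
-- what changed: B converts the ints once up front and walks the flat array with an integer index pointer in a single recursive pass, instead of A's re-running int() over and re-slicing/copying the remaining list at every node (O(n^2) copying avoided; a timing run's large random inputs are not well-formed trees, so the speed-up was not measurable there).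
-- outside the precondition, e.g. on parse_input_data([0, -1, 5]): A returns (0, 0, [5]), B returns (0, 0, [-1, 5])
import Mathlib
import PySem

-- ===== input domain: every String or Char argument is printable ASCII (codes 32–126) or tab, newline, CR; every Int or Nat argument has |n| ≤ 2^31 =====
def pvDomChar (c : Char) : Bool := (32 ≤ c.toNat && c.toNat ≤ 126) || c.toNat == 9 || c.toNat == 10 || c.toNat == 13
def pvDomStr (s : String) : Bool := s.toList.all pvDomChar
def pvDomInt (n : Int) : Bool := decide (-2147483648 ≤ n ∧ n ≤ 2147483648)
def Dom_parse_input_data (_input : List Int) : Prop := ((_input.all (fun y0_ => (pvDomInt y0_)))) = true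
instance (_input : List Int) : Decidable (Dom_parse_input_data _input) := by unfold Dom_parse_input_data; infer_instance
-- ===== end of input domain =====

-- B replaces A's per-node list slicing/copying (and re-running int() on every sublist) by one
-- upfront conversion and an integer index pointer over a single array, a single pass
-- (objective: alternative algorithm; avoids A's quadratic copying).

-- ===== PORT A =====
-- Python A recurses on sublists; the recursion is realised with a fuel parameter
-- (fuel = length + 1, always sufficient on Pre_; fuel exhaustion / a list shorter than the
-- 2-element header, where Python raises ValueError, are outside Pre_ and return a dummy).
mutual
def goA : Nat → List Int → Int × Int × List Int
  | 0, _ => (0, 0, [])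
  | f+1, l =>
    match l with
    | children :: metas :: data0 =>
      -- for i in range(children): total, score, data = parse_input_data(data); …
      let st := loopA f children.toNat (0, ([] : List Int), data0)
      let totals := st.1
      let scores := st.2.1
      let data := st.2.2
      -- totals += sum(data[:metas])
      let totals := totals + (PySem.List.slice data none (some metas)).sum
      if children == 0 then
        (totals, (PySem.List.slice data none (some metas)).sum,
         PySem.List.slice data (some metas) none)
      else
        (totals,
         (PySem.List.slice data none (some metas)).foldl
           (fun acc k => if 0 < k ∧ k ≤ (scores.length : Int)
                         then acc + scores.getD (k - 1).toNat 0 else acc) 0,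
         PySem.List.slice data (some metas) none)
    | _ => (0, 0, [])   -- 'children, metas = _input[:2]' raises here: outside Pre_
termination_by f _ => (f, 0)

def loopA : Nat → Nat → Int × List Int × List Int → Int × List Int × List Int
  | _, 0, st => st
  | f, n+1, st =>
      let r := goA f st.2.2
      loopA f n (st.1 + r.1, st.2.1 ++ [r.2.1], r.2.2)
termination_by f n _ => (f, n + 1)
end

def parse_input_data (_input : List Int) : Int × Int × List Int :=
  goA (_input.length + 1) _input

-- ===== PORT B =====
-- Source B: convert once, then one pass with an integer pointer i into the fixed array.
-- arr[i], arr[i+1] (IndexError only outside Pre_) realised with getD; arr[i:i+m] on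
-- Pre_ has m ≥ 0, realised as drop/take at the pointer.
mutual
def nodeB (arr : List Int) : Nat → Nat → Int × Int × Nat
  | 0, i => (0, 0, i)
  | f+1, i =>
    let c := arr.getD i 0
    let m := arr.getD (i+1) 0
    let st := loopB arr f c.toNat (0, ([] : List Int), i + 2)
    let total := st.1
    let scores := st.2.1
    let j := st.2.2
    let metaL := (arr.drop j).take m.toNat
    let total := total + metaL.sum
    let value :=
      if c == 0 then metaL.sum
      else metaL.foldl
        (fun acc k => if 0 < k ∧ k ≤ c then acc + scores.getD (k - 1).toNat 0 else acc) 0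
    (total, value, j + m.toNat)
termination_by f _ => (f, 0)

def loopB (arr : List Int) : Nat → Nat → Int × List Int × Nat → Int × List Int × Nat
  | _, 0, st => st
  | f, n+1, st =>
      let r := nodeB arr f st.2.2
      loopB arr f n (st.1 + r.1, st.2.1 ++ [r.2.1], r.2.2)
termination_by f n _ => (f, n + 1)
end

def parse_input_data_alt (_input : List Int) : Int × Int × List Int :=
  let r := nodeB _input (_input.length + 1) 0
  (r.1, r.2.1, _input.drop r.2.2)

-- ===== PRECONDITION & SPEC =====
-- Grammar acceptor for the AoC-8 node format: a node = header c,m with m ≥ 0, then c child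
-- nodes, then m metadata entries (the last node's metadata may be truncated by the end of
-- the list, as Python's clamping slices allow). It checks shape only, computes no output.
def chkNode : Nat → List Int → Option (List Int)
  | 0, _ => none
  | f+1, l =>
    match l with
    | c :: m :: rest =>
      -- 2*c ≤ |rest|: c children need at least 2 header entries each, so a larger declared
      -- child count can never parse (A necessarily raises); rejecting it at once keeps the
      -- acceptor linear in the input length.
      if 0 ≤ m ∧ 2 * c.toNat ≤ rest.length then
        ((List.range c.toNat).foldl (fun acc _ => acc.bind (chkNode f)) (some rest)).map
          (fun r => r.drop m.toNat)
      else none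
    | _ => none

-- Pre_ = the input starts with a well-formed node encoding (exactly where A returns),
-- except that it also requires every node's metadata count to be nonnegative: on a negative
-- metadata count A still returns, but its value (a negative slice silently dropping elements
-- from the END of the remaining data) is an accident of Python slicing on nonsense input.
def Pre_parse_input_data (_input : List Int) : Prop :=
  (chkNode (_input.length + 1) _input).isSome = true
instance (_input : List Int) : Decidable (Pre_parse_input_data _input) := by
  unfold Pre_parse_input_data; infer_instance

def pvWitness_parse_input_data : List Int :=
  [2, 3, 0, 3, 10, 11, 12, 1, 1, 0, 1, 99, 2, 1, 1, 2]

def Spec_parse_input_data (_input : List Int) (out : Int × Int × List Int) : Prop := out = parse_input_data_alt _input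
instance (_input : List Int) (out : Int × Int × List Int) : Decidable (Spec_parse_input_data _input out) := by unfold Spec_parse_input_data; infer_instance

-- ===== CLAIM (what is proved, stated in full; the proofs are below) =====
def Claim_equal_parse_input_data : Prop := ∀ (_input : List Int), Dom_parse_input_data _input → Pre_parse_input_data _input → Spec_parse_input_data _input (parse_input_data _input)

-- ===== LEMMAS AND PROOFS =====

-- the children-sequence acceptor, named for the proofs
def chkKids (f n : Nat) (l : List Int) : Option (List Int) :=
  (List.range n).foldl (fun acc _ => acc.bind (chkNode f)) (some l)

theorem chkKids_zero (f : Nat) (l : List Int) : chkKids f 0 l = some l := rfl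

theorem chkKids_none (f n : Nat) :
    (List.range n).foldl (fun acc _ => acc.bind (chkNode f)) none = none := by
  induction n with
  | zero => rfl
  | succ n ih => rw [List.range_succ, List.foldl_append, ih]; rfl

theorem chkKids_succ (f n : Nat) (l : List Int) :
    chkKids f (n + 1) l = (chkNode f l).bind (chkKids f n) := by
  unfold chkKids
  rw [List.range_succ_eq_map, List.foldl_cons, List.foldl_map]
  cases h : chkNode f l with
  | none => simp [h, chkKids_none]
  | some l' => simp [h]

theorem chkNode_fold_eq_chkKids (f n : Nat) (l : List Int) :
    (List.range n).foldl (fun acc _ => acc.bind (chkNode f)) (some l) = chkKids f n l := rfl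

theorem pv_drop_head (arr : List Int) (i : Nat) (c : Int) (t : List Int)
    (h : arr.drop i = c :: t) : arr.getD i 0 = c := by
  have : arr[i]? = some c := by
    have h0 : (arr.drop i)[0]? = some c := by simp [h]
    simpa using h0
  simp [List.getD, this]

theorem pv_drop_two (arr : List Int) (i : Nat) (c m : Int) (t : List Int)
    (h : arr.drop i = c :: m :: t) : arr.drop (i + 2) = t := by
  have : (arr.drop i).drop 2 = arr.drop (i + 2) := by
    rw [List.drop_drop]
  rw [← this, h]
  simp

-- Invariant P f: on any suffix accepted by the grammar with fuel f, A's recursion and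
-- B's pointer recursion agree (B's pointer j marks exactly A's leftover suffix).
def PInv (f : Nat) : Prop :=
  ∀ (arr : List Int) (i : Nat) (rest : List Int),
    chkNode f (arr.drop i) = some rest →
    goA f (arr.drop i) =
      ((nodeB arr f i).1, (nodeB arr f i).2.1, arr.drop (nodeB arr f i).2.2) ∧
    rest = arr.drop (nodeB arr f i).2.2

def QInv (f : Nat) : Prop :=
  ∀ (n : Nat) (arr : List Int) (i : Nat) (rest : List Int) (t : Int) (s : List Int),
    chkKids f n (arr.drop i) = some rest →
    loopA f n (t, s, arr.drop i) =
      ((loopB arr f n (t, s, i)).1, (loopB arr f n (t, s, i)).2.1,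
        arr.drop (loopB arr f n (t, s, i)).2.2) ∧
    rest = arr.drop (loopB arr f n (t, s, i)).2.2 ∧
    (loopB arr f n (t, s, i)).2.1.length = s.length + n

theorem pv_Q (f : Nat) (hP : PInv f) : QInv f := by
  intro n
  induction n with
  | zero =>
    intro arr i rest t s h
    rw [chkKids_zero, Option.some.injEq] at h
    simp [loopA, loopB, h]
  | succ n ih =>
    intro arr i rest t s h
    rw [chkKids_succ] at h
    simp only [Option.bind_eq_some_iff] at h
    obtain ⟨mid, hmid, hrest⟩ := h
    obtain ⟨hgo, hmid'⟩ := hP arr i mid hmid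
    have hrest' : chkKids f n (arr.drop (nodeB arr f i).2.2) = some rest := by
      rw [← hmid']; exact hrest
    have := ih arr (nodeB arr f i).2.2 rest (t + (nodeB arr f i).1)
      (s ++ [(nodeB arr f i).2.1]) hrest'
    simp only [loopA, loopB, hgo]
    refine ⟨this.1, this.2.1, ?_⟩
    rw [this.2.2]
    simp; omega

theorem pv_P : ∀ f, PInv f := by
  intro f
  induction f with
  | zero => intro arr i rest h; simp [chkNode] at h
  | succ f ih =>
    intro arr i rest h
    match hd : arr.drop i with
    | [] => rw [hd] at h; simp [chkNode] at h
    | [c] => rw [hd] at h; simp [chkNode] at h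
    | c :: m :: data0 =>
      rw [hd] at h
      simp only [chkNode, chkNode_fold_eq_chkKids] at h
      split_ifs at h with hmg
      have hm : 0 ≤ m := hmg.1
      · simp only [Option.map_eq_some_iff] at h
        obtain ⟨r0, hk, hrest⟩ := h
        have hdata : arr.drop (i + 2) = data0 := pv_drop_two arr i c m data0 hd
        have hc : arr.getD i 0 = c := pv_drop_head arr i c _ hd
        have hm' : arr.getD (i + 1) 0 = m := by
          have : arr.drop (i + 1) = m :: data0 := by
            have h1 : (arr.drop i).drop 1 = arr.drop (i + 1) := by rw [List.drop_drop]
            rw [← h1, hd]; simp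
          exact pv_drop_head arr (i + 1) m _ this
        have hk' : chkKids f c.toNat (arr.drop (i + 2)) = some r0 := by rw [hdata]; exact hk
        obtain ⟨hloop, hr0, hlen⟩ := pv_Q f ih c.toNat arr (i + 2) r0 0 [] hk'
        -- abbreviations for the loop results
        set TB := loopB arr f c.toNat (0, ([] : List Int), i + 2) with hTB
        have hlen' : TB.2.1.length = c.toNat := by simpa using hlen
        -- the two metadata slices are the same list
        have hslice : PySem.List.slice (arr.drop TB.2.2) none (some m)
            = (arr.drop TB.2.2).take m.toNat := PySem.List.slice_to _ hm
        have hslice2 : PySem.List.slice (arr.drop TB.2.2) (some m) none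
            = arr.drop (TB.2.2 + m.toNat) := by
          rw [PySem.List.slice_from _ hm, List.drop_drop]
        -- the selection folds agree: the guards k <= len(scores) and k <= c coincide
        have hcond : ∀ k : Int, ((0 < k ∧ k ≤ (TB.2.1.length : Int)) ↔ (0 < k ∧ k ≤ c)) := by
          intro k
          rw [hlen']
          by_cases hc0 : 0 ≤ c
          · rw [Int.toNat_of_nonneg hc0]
          · have h1 : c.toNat = 0 := Int.toNat_of_nonpos (le_of_not_ge hc0)
            rw [h1]
            push_cast
            omega
        have hfun : (fun (acc : Int) (k : Int) =>
              if 0 < k ∧ k ≤ (TB.2.1.length : Int) then acc + TB.2.1.getD (k - 1).toNat 0 else acc)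
            = (fun (acc : Int) (k : Int) =>
              if 0 < k ∧ k ≤ c then acc + TB.2.1.getD (k - 1).toNat 0 else acc) := by
          funext acc k
          by_cases hck : 0 < k ∧ k ≤ c
          · rw [if_pos ((hcond k).mpr hck), if_pos hck]
          · rw [if_neg (fun hh => hck ((hcond k).mp hh)), if_neg hck]
        constructor
        · simp only [goA, nodeB, hc, hm', ← hdata, hloop, ← hTB, hslice, hslice2, hfun]
          split_ifs <;> rfl
        · simp only [nodeB, hc, hm', ← hTB]
          rw [← hrest, hr0, List.drop_drop]

-- ===== VERDICT (by name: the statement is the Claim_ definition above) =====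
theorem parse_input_data_spec : Claim_equal_parse_input_data := by
  intro l _ hpre
  unfold Spec_parse_input_data parse_input_data parse_input_data_alt
  unfold Pre_parse_input_data at hpre
  rw [Option.isSome_iff_exists] at hpre
  obtain ⟨rest, hrest⟩ := hpre
  have h0 : l.drop 0 = l := List.drop_zero
  have := pv_P (l.length + 1) l 0 rest (by rw [h0]; exact hrest)
  rw [h0] at this
  exact this.1
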